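-- pv_equiv track=rewrite | github.com/Atilla43/leadphonefinder | bot/services/scrapper/query_parser.py | fuzzy_find_best_match
-- ===== SOURCE A (Python) =====
-- from typing import Optional, Callable, Awaitable
--
-- def levenshtein_distance(s1: str, s2: str) -> int:
--     """
--     Вычисляет расстояние Левенштейна между двумя строками.
--     Чем меньше значение, тем более похожи строки.
--     """
--     if len(s1) < len(s2):
--         return levenshtein_distance(s2, s1)
--
--     if len(s2) == 0:
--         return len(s1)
--
--     previous_row = range(len(s2) + 1)
--     for i, c1 in enumerate(s1):
--         current_row = [i + 1]
--         for j, c2 in enumerate(s2):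
--             # Вставка, удаление, замена
--             insertions = previous_row[j + 1] + 1
--             deletions = current_row[j] + 1
--             substitutions = previous_row[j] + (c1 != c2)
--             current_row.append(min(insertions, deletions, substitutions))
--         previous_row = current_row
--
--     return previous_row[-1]
--
-- def fuzzy_find_best_match(
--     query: str,
--     candidates: list[str],
--     max_distance: int = 2,
-- ) -> Optional[str]:
--     """
--     Находит лучшее совпадение с учётом опечаток.
--
--     Args:
--         query: Искомая строка (возможно с опечаткой)
--         candidates: Список кандидатов
--         max_distance: Максимальное расстояние Левенштейна
--
--     Returns:
--         Лучший кандидат или None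
--     """
--     if not query or not candidates:
--         return None
--
--     query_lower = query.lower().strip()
--
--     # Сначала точное совпадение
--     for candidate in candidates:
--         if candidate.lower() == query_lower:
--             return candidate
--
--     # Затем fuzzy matching
--     best_match = None
--     best_distance = max_distance + 1
--
--     for candidate in candidates:
--         candidate_lower = candidate.lower()
--         distance = levenshtein_distance(query_lower, candidate_lower)
--
--         # Учитываем длину слова для порога
--         # Для коротких слов (3-4 буквы) допускаем 1 ошибку
--         # Для длинных (7+) допускаем 2-3 ошибки
--         adjusted_max = min(max_distance, max(1, len(candidate_lower) // 3))
--
--         if distance <= adjusted_max and distance < best_distance: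
--             best_distance = distance
--             best_match = candidate
--
--     return best_match
-- ===== SOURCE B (Python) =====
-- def _lev(a: str, b: str) -> int:
--     # One-directional two-row DP (no argument swap), walking the previous row
--     # with zip instead of indexing.
--     prev = list(range(len(b) + 1))
--     for i, ca in enumerate(a):
--         cur = [i + 1]
--         for cb, up_left, up in zip(b, prev, prev[1:]):
--             cur.append(min(up + 1, cur[-1] + 1, up_left + (ca != cb)))
--         prev = cur
--     return prev[-1]
--
--
-- def fuzzy_find_best_match(query, candidates, max_distance=2):
--     if not query or not candidates:
--         return None
--
--     q = query.lower().strip()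
--
--     best = None
--     best_distance = max_distance + 1
--
--     # Single pass: an exact match wins immediately; otherwise keep the best
--     # fuzzy candidate, skipping candidates whose length difference already
--     # exceeds the current useful threshold (distance >= |len difference|).
--     for candidate in candidates:
--         cl = candidate.lower()
--         if cl == q:
--             return candidate
--         adjusted_max = min(max_distance, max(1, len(cl) // 3))
--         limit = min(adjusted_max, best_distance - 1)
--         if abs(len(q) - len(cl)) > limit:
--             continue
--         d = _lev(cl, q)
--         if d <= adjusted_max and d < best_distance:
--             best_distance = d
--             best = candidate
--     return best
-- ===== Notes on version B (the rewrite author's own statement) =====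
-- stated objective: faster
-- what changed: One pass over the candidates (returning on the first exact match, and skipping a candidate's whole DP when its length difference from the query already exceeds the useful threshold, valid since distance >= |len difference|) instead of A's exact-match scan followed by a fuzzy scan that runs the full DP on every candidate; the DP itself is an unswapped zip-walking two-row Levenshtein instead of A's swap-to-longer indexed-row DP.
import Mathlib
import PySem

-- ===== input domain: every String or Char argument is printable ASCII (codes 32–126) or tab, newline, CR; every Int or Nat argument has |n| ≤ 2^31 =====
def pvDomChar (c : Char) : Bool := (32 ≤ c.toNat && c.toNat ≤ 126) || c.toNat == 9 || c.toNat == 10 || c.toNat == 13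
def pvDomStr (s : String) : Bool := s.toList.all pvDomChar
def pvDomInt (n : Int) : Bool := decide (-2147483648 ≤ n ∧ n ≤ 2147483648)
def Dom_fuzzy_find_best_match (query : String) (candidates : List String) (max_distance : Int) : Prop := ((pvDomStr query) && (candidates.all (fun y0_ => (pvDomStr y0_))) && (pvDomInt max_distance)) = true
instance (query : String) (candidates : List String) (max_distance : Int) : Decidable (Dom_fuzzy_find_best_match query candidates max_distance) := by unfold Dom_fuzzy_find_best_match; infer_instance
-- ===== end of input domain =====

-- B (faster, measured): one pass over the candidates that returns on the first exact match
-- and skips a candidate's whole DP when the length difference already rules it out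
-- (distance >= |len difference|), instead of A's exact-match scan followed by a fuzzy scan
-- running the full DP on every candidate; the DP is an unswapped zip-walking two-row one.

-- ===== PORT A =====

-- the DP part of A's levenshtein_distance (the code after the swap and the empty check)
def lev_core (l1 l2 : List Char) : Int :=
  let previous_row := PySem.List.pyRange 0 ((l2.length : Int) + 1) 1
  let final :=
    (PySem.List.enumerate l1).foldl
      (fun previous_row ic =>
        let i := ic.1
        let c1 := ic.2
        (PySem.List.enumerate l2).foldl
          (fun current_row jc =>
            let j := jc.1
            let c2 := jc.2
            let insertions := PySem.List.pyGetD previous_row (j + 1) 0 + 1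
            let deletions := PySem.List.pyGetD current_row j 0 + 1
            let substitutions := PySem.List.pyGetD previous_row j 0 + (if c1 ≠ c2 then 1 else 0)
            current_row ++ [min insertions (min deletions substitutions)])
          [i + 1])
      previous_row
  PySem.List.pyGetD final (-1) 0

def levenshtein_distance (s1 s2 : String) : Int :=
  if PySem.Str.len s1 < PySem.Str.len s2 then
    levenshtein_distance s2 s1
  else if PySem.Str.len s2 = 0 then
    PySem.Str.len s1
  else
    lev_core s1.toList s2.toList
termination_by (if PySem.Str.len s1 < PySem.Str.len s2 then 1 else 0 : Nat)
decreasing_by simp only [PySem.Str.len_eq] at *; split_ifs <;> omega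

-- 'for candidate in candidates: if candidate.lower() == query_lower: return candidate'
def findExactA (q : String) : List String → Option String
  | [] => none
  | c :: rest => if PySem.Str.lower c = q then some c else findExactA q rest

def fuzzy_find_best_match (query : String) (candidates : List String) (max_distance : Int) : Option String :=
  if PySem.Str.len query = 0 ∨ candidates.length = 0 then none
  else
    let query_lower := PySem.Str.strip (PySem.Str.lower query)
    match findExactA query_lower candidates with
    | some c => some c
    | none =>
      let st :=
        candidates.foldl
          (fun st candidate =>
            let candidate_lower := PySem.Str.lower candidate
            let distance := levenshtein_distance query_lower candidate_lower
            let adjusted_max :=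
              min max_distance (max 1 (PySem.Int.floordiv (PySem.Str.len candidate_lower) 3))
            if distance ≤ adjusted_max ∧ distance < st.2 then (some candidate, distance) else st)
          ((none : Option String), max_distance + 1)
      st.1

-- ===== PORT B =====

-- Source B's _lev: rows over a, previous row consumed by zip(b, prev, prev[1:]), cur[-1] for the left cell
def lev_alt (a b : List Char) : Int :=
  let prev0 : List Int := PySem.List.pyRange 0 ((b.length : Int) + 1) 1
  let final :=
    (PySem.List.enumerate a).foldl
      (fun prev ic =>
        let i := ic.1
        let ca := ic.2
        (b.zip (prev.zip prev.tail)).foldl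
          (fun cur t =>
            let cb := t.1
            let up_left := t.2.1
            let up := t.2.2
            cur ++ [min (up + 1) (min (PySem.List.pyGetD cur (-1) 0 + 1)
                       (up_left + (if ca ≠ cb then 1 else 0)))])
          [i + 1])
      prev0
  PySem.List.pyGetD final (-1) 0

-- Source B's single 'for candidate in candidates' loop
def fuzzyLoopB (q : String) (max_distance : Int) :
    List String → Option String → Int → Option String
  | [], best, _ => best
  | c :: rest, best, best_distance =>
    let cl := PySem.Str.lower c
    if cl = q then some c
    else
      let adjusted_max := min max_distance (max 1 (PySem.Int.floordiv (PySem.Str.len cl) 3))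
      let limit := min adjusted_max (best_distance - 1)
      if |PySem.Str.len q - PySem.Str.len cl| > limit then
        fuzzyLoopB q max_distance rest best best_distance
      else
        let d := lev_alt cl.toList q.toList
        if d ≤ adjusted_max ∧ d < best_distance then
          fuzzyLoopB q max_distance rest (some c) d
        else
          fuzzyLoopB q max_distance rest best best_distance

def fuzzy_find_best_match_alt (query : String) (candidates : List String) (max_distance : Int) : Option String :=
  if PySem.Str.len query = 0 ∨ candidates.length = 0 then none
  else
    let q := PySem.Str.strip (PySem.Str.lower query)
    fuzzyLoopB q max_distance candidates none (max_distance + 1)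

-- ===== PRECONDITION & SPEC =====
def Spec_fuzzy_find_best_match (query : String) (candidates : List String) (max_distance : Int) (out : Option String) : Prop := out = fuzzy_find_best_match_alt query candidates max_distance
instance (query : String) (candidates : List String) (max_distance : Int) (out : Option String) : Decidable (Spec_fuzzy_find_best_match query candidates max_distance out) := by unfold Spec_fuzzy_find_best_match; infer_instance

-- ===== CLAIM (what is proved, stated in full; the proofs are below) =====
def Claim_equal_fuzzy_find_best_match : Prop := ∀ (query : String) (candidates : List String) (max_distance : Int), Dom_fuzzy_find_best_match query candidates max_distance → Spec_fuzzy_find_best_match query candidates max_distance (fuzzy_find_best_match query candidates max_distance)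

-- ===== LEMMAS AND PROOFS =====

-- reference Levenshtein distance, head recursion
def levSpec : List Char → List Char → Nat
  | [], ys => ys.length
  | _ :: xs, [] => xs.length + 1
  | x :: xs, y :: ys =>
      min (levSpec xs ys + (if x = y then 0 else 1))
          (min (levSpec xs (y :: ys) + 1) (levSpec (x :: xs) ys + 1))
termination_by xs ys => xs.length + ys.length
decreasing_by all_goals simp <;> omega

lemma levSpec_nil_right (xs : List Char) : levSpec xs [] = xs.length := by
  cases xs <;> simp [levSpec]

lemma levSpec_comm (xs ys : List Char) : levSpec xs ys = levSpec ys xs := by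
  induction xs, ys using levSpec.induct with
  | case1 ys => simp [levSpec, levSpec_nil_right]
  | case2 xs => simp [levSpec, levSpec_nil_right]
  | case3 x xs y ys ih1 ih2 ih3 =>
      rw [levSpec, levSpec, ih1, ih2, ih3]
      have hc : (if x = y then 0 else 1) = (if y = x then 0 else 1) := by
        by_cases h : x = y <;> simp [h, Ne.symm]
      rw [hc]; omega

lemma levSpec_len_le (xs ys : List Char) :
    ys.length ≤ levSpec xs ys + xs.length ∧ xs.length ≤ levSpec xs ys + ys.length := by
  induction xs, ys using levSpec.induct with
  | case1 ys => simp [levSpec]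
  | case2 xs => simp [levSpec]
  | case3 x xs y ys ih1 ih2 ih3 =>
      obtain ⟨h1, h1'⟩ := ih1; obtain ⟨h2, h2'⟩ := ih2; obtain ⟨h3, h3'⟩ := ih3
      rw [levSpec]
      simp only [List.length_cons] at *
      by_cases h : x = y
      · subst h; rw [if_pos rfl]; omega
      · rw [if_neg h]; omega

-- the DP row after processing the (reversed) prefix ri of the outer string
def specRow (ri : List Char) (s2 : List Char) : List Int :=
  (List.range (s2.length + 1)).map (fun j => (levSpec ri ((s2.take j).reverse) : Int))

lemma length_specRow (ri s2 : List Char) : (specRow ri s2).length = s2.length + 1 := by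
  simp [specRow]

lemma specRow_nil (s2 : List Char) :
    specRow [] s2 = PySem.List.pyRange 0 ((s2.length : Int) + 1) 1 := by
  rw [PySem.List.pyRange_one]
  have : ((s2.length : Int) + 1 - 0).toNat = s2.length + 1 := by omega
  rw [this, specRow]
  apply List.map_congr_left
  intro j hj
  simp at hj
  simp [levSpec]
  omega

lemma pyGetD_specRow (ri s2 : List Char) (j : Nat) (hj : j ≤ s2.length) :
    PySem.List.pyGetD (specRow ri s2) (j : Int) 0 = (levSpec ri ((s2.take j).reverse) : Int) := by
  rw [PySem.List.pyGetD_natCast, specRow]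
  rw [List.getD_eq_getElem?_getD]
  simp [Nat.lt_succ_of_le hj]

lemma specRow_append_singleton (ri pre : List Char) (c2 : Char) :
    specRow ri (pre ++ [c2]) =
      specRow ri pre ++ [(levSpec ri (c2 :: pre.reverse) : Int)] := by
  unfold specRow
  rw [List.length_append, List.length_singleton, List.range_succ, List.map_append]
  congr 1
  · apply List.map_congr_left
    intro j hj
    simp at hj
    rw [List.take_append_of_le_length (by omega)]
  · have h2 : (pre ++ [c2]).take (pre.length + 1) = pre ++ [c2] :=
      List.take_of_length_le (by simp)
    simp [h2]

lemma innerA (c1 : Char) (ri s2 : List Char) :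
    ∀ (t pre : List Char), pre ++ t = s2 →
    (PySem.List.enumerate t (pre.length : Int)).foldl
      (fun current_row jc =>
        let j := jc.1
        let c2 := jc.2
        let insertions := PySem.List.pyGetD (specRow ri s2) (j + 1) 0 + 1
        let deletions := PySem.List.pyGetD current_row j 0 + 1
        let substitutions := PySem.List.pyGetD (specRow ri s2) j 0 + (if c1 ≠ c2 then 1 else 0)
        current_row ++ [min insertions (min deletions substitutions)])
      (specRow (c1 :: ri) pre) = specRow (c1 :: ri) s2 := by
  intro t
  induction t with
  | nil => intro pre h; simp at h; subst h; simp [PySem.List.enumerate_nil]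
  | cons c2 t' ih =>
    intro pre h
    rw [PySem.List.enumerate_cons, List.foldl_cons]
    have hlt : pre.length < s2.length := by
      subst h; simp
    have hins : PySem.List.pyGetD (specRow ri s2) ((pre.length : Int) + 1) 0
        = (levSpec ri (c2 :: pre.reverse) : Int) := by
      have : ((pre.length : Int) + 1) = ((pre.length + 1 : Nat) : Int) := by push_cast; ring
      rw [this, pyGetD_specRow ri s2 _ (by omega)]
      have h2 : s2.take (pre.length + 1) = pre ++ [c2] := by
        rw [← h, List.take_length_add_append]
        simp
      rw [h2]
      simp
    have hsub : PySem.List.pyGetD (specRow ri s2) ((pre.length : Int)) 0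
        = (levSpec ri pre.reverse : Int) := by
      rw [pyGetD_specRow ri s2 _ (by omega)]
      have h2 : s2.take pre.length = pre := by
        rw [← h, List.take_append_of_le_length (le_refl _), List.take_length]
      rw [h2]
    have hdel : PySem.List.pyGetD (specRow (c1 :: ri) pre) ((pre.length : Int)) 0
        = (levSpec (c1 :: ri) pre.reverse : Int) := by
      rw [pyGetD_specRow (c1 :: ri) pre _ (le_refl _)]
      rw [List.take_length]
    simp only [hins, hsub, hdel]
    have hcell : min ((levSpec ri (c2 :: pre.reverse) : Int) + 1)
          (min ((levSpec (c1 :: ri) pre.reverse : Int) + 1)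
            ((levSpec ri pre.reverse : Int) + (if c1 ≠ c2 then 1 else 0)))
        = (levSpec (c1 :: ri) (c2 :: pre.reverse) : Int) := by
      rw [levSpec]
      have hco : (if c1 = c2 then (0:Nat) else 1) = (if c1 ≠ c2 then 1 else 0) := by
        by_cases hx : c1 = c2 <;> simp [hx]
      rw [hco]
      push_cast
      omega
    rw [hcell, ← specRow_append_singleton]
    have hlen : ((pre.length : Int) + 1) = (((pre ++ [c2]).length : Nat) : Int) := by
      simp
    rw [hlen]
    exact ih (pre ++ [c2]) (by simp [← h])

lemma specRow_empty_s2 (ri : List Char) :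
    specRow ri [] = [(levSpec ri [] : Int)] := by
  simp [specRow]

lemma outerA (s2 : List Char) : ∀ (l ri : List Char),
    (PySem.List.enumerate l (ri.length : Int)).foldl
      (fun previous_row ic =>
        let i := ic.1
        let c1 := ic.2
        (PySem.List.enumerate s2).foldl
          (fun current_row jc =>
            let j := jc.1
            let c2 := jc.2
            let insertions := PySem.List.pyGetD previous_row (j + 1) 0 + 1
            let deletions := PySem.List.pyGetD current_row j 0 + 1
            let substitutions := PySem.List.pyGetD previous_row j 0 + (if c1 ≠ c2 then 1 else 0)
            current_row ++ [min insertions (min deletions substitutions)])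
          [i + 1])
      (specRow ri s2) = specRow (l.reverse ++ ri) s2 := by
  intro l
  induction l with
  | nil => intro ri; simp [PySem.List.enumerate_nil]
  | cons c1 l' ih =>
    intro ri
    rw [PySem.List.enumerate_cons, List.foldl_cons]
    have hinit : [((ri.length : Int)) + 1] = specRow (c1 :: ri) ([] : List Char) := by
      rw [specRow_empty_s2]
      have : levSpec (c1 :: ri) [] = ri.length + 1 := by
        rw [levSpec]
      rw [this]; push_cast; ring_nf
    have hstep := innerA c1 ri s2 s2 [] (by simp)
    simp only [List.length_nil, Nat.cast_zero] at hstep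
    simp only [hinit]
    rw [hstep]
    have hlen : ((ri.length : Int)) + 1 = (((c1 :: ri).length : Nat) : Int) := by
      simp
    rw [hlen, ih (c1 :: ri)]
    simp

lemma getLast_specRow (ri s2 : List Char) :
    PySem.List.pyGetD (specRow ri s2) (-1) 0 = (levSpec ri s2.reverse : Int) := by
  rw [PySem.List.pyGetD_neg_one (specRow ri s2) 0 (by simp [specRow])]
  simp [specRow, List.range_succ]

lemma lev_core_eq (l1 l2 : List Char) :
    lev_core l1 l2 = (levSpec l1.reverse l2.reverse : Int) := by
  unfold lev_core
  dsimp only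
  have h0 := specRow_nil l2
  rw [← h0]
  have := outerA l2 l1 []
  simp only [List.length_nil, Nat.cast_zero, List.append_nil] at this
  rw [this, getLast_specRow]

lemma zip_specRow (ri s2 : List Char) :
    (specRow ri s2).zip (specRow ri s2).tail =
      (List.range s2.length).map
        (fun j => ((levSpec ri ((s2.take j).reverse) : Int),
                   (levSpec ri ((s2.take (j + 1)).reverse) : Int))) := by
  apply List.ext_getElem
  · simp [length_specRow]
  · intro j h1 h2
    simp only [List.getElem_zip, List.getElem_tail, List.getElem_map, List.getElem_range]
    have hj : j < s2.length := by
      simpa [length_specRow] using h2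
    simp [specRow]

lemma innerB (ca : Char) (ri s2 : List Char) :
    ∀ (t pre : List Char), pre ++ t = s2 →
    ((t.zip (((specRow ri s2).zip (specRow ri s2).tail).drop pre.length)).foldl
      (fun cur t0 =>
        let cb := t0.1
        let up_left := t0.2.1
        let up := t0.2.2
        cur ++ [min (up + 1) (min (PySem.List.pyGetD cur (-1) 0 + 1)
                   (up_left + (if ca ≠ cb then 1 else 0)))])
      (specRow (ca :: ri) pre)) = specRow (ca :: ri) s2 := by
  intro t
  induction t with
  | nil =>
    intro pre h; simp at h; subst h; simp
  | cons c2 t' ih =>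
    intro pre h
    have hlt : pre.length < s2.length := by subst h; simp
    have hdrop : (((specRow ri s2).zip (specRow ri s2).tail).drop pre.length) =
        ((levSpec ri ((s2.take pre.length).reverse) : Int),
         (levSpec ri ((s2.take (pre.length + 1)).reverse) : Int)) ::
        (((specRow ri s2).zip (specRow ri s2).tail).drop (pre.length + 1)) := by
      rw [zip_specRow, List.drop_eq_getElem_cons (by simp; omega)]
      congr 1
      simp
    rw [hdrop, List.zip_cons_cons, List.foldl_cons]
    have hpre : s2.take pre.length = pre := by
      rw [← h, List.take_append_of_le_length (le_refl _), List.take_length]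
    have hpre1 : s2.take (pre.length + 1) = pre ++ [c2] := by
      rw [← h, List.take_length_add_append]
      simp
    dsimp only
    rw [hpre, hpre1, PySem.List.pyGetD_neg_one (specRow (ca :: ri) pre) 0 (by simp [specRow]),
        show (specRow (ca :: ri) pre).getLast (by simp [specRow]) =
          (levSpec (ca :: ri) pre.reverse : Int) from by
            rw [← PySem.List.pyGetD_neg_one (specRow (ca :: ri) pre) 0 (by simp [specRow])]
            exact getLast_specRow _ _]
    have hcell : min ((levSpec ri (pre ++ [c2]).reverse : Int) + 1)
          (min ((levSpec (ca :: ri) pre.reverse : Int) + 1)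
            ((levSpec ri pre.reverse : Int) + (if ca ≠ c2 then 1 else 0)))
        = (levSpec (ca :: ri) (c2 :: pre.reverse) : Int) := by
      rw [levSpec]
      have hco : (if ca = c2 then (0:Nat) else 1) = (if ca ≠ c2 then 1 else 0) := by
        by_cases hx : ca = c2 <;> simp [hx]
      rw [hco]
      simp only [List.reverse_append, List.reverse_singleton, List.singleton_append]
      push_cast
      omega
    rw [hcell, ← specRow_append_singleton]
    have := ih (pre ++ [c2]) (by simp [← h])
    simpa using this

lemma outerB (s2 : List Char) : ∀ (l ri : List Char),
    (PySem.List.enumerate l (ri.length : Int)).foldl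
      (fun prev ic =>
        let i := ic.1
        let ca := ic.2
        (s2.zip (prev.zip prev.tail)).foldl
          (fun cur t0 =>
            let cb := t0.1
            let up_left := t0.2.1
            let up := t0.2.2
            cur ++ [min (up + 1) (min (PySem.List.pyGetD cur (-1) 0 + 1)
                       (up_left + (if ca ≠ cb then 1 else 0)))])
          [i + 1])
      (specRow ri s2) = specRow (l.reverse ++ ri) s2 := by
  intro l
  induction l with
  | nil => intro ri; simp [PySem.List.enumerate_nil]
  | cons ca l' ih =>
    intro ri
    rw [PySem.List.enumerate_cons, List.foldl_cons]
    have hinit : [((ri.length : Int)) + 1] = specRow (ca :: ri) ([] : List Char) := by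
      rw [specRow_empty_s2]
      have : levSpec (ca :: ri) [] = ri.length + 1 := by rw [levSpec]
      rw [this]; push_cast; ring_nf
    have hstep := innerB ca ri s2 s2 [] (by simp)
    simp only [List.length_nil, List.drop_zero] at hstep
    simp only [hinit]
    rw [hstep]
    have hlen : ((ri.length : Int)) + 1 = (((ca :: ri).length : Nat) : Int) := by simp
    rw [hlen, ih (ca :: ri)]
    simp

lemma lev_alt_eq (a b : List Char) :
    lev_alt a b = (levSpec a.reverse b.reverse : Int) := by
  unfold lev_alt
  dsimp only
  rw [← specRow_nil b]
  have := outerB b a []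
  simp only [List.length_nil, Nat.cast_zero, List.append_nil] at this
  rw [this, getLast_specRow]

lemma levenshtein_distance_eq_of_ge (s1 s2 : String)
    (h : ¬ PySem.Str.len s1 < PySem.Str.len s2) :
    levenshtein_distance s1 s2 = (levSpec s1.toList.reverse s2.toList.reverse : Int) := by
  rw [levenshtein_distance, if_neg h]
  by_cases h2 : PySem.Str.len s2 = 0
  · rw [if_pos h2]
    have : s2.toList = [] := by
      simp only [PySem.Str.len_eq] at h2
      exact List.eq_nil_of_length_eq_zero (by exact_mod_cast h2)
    rw [this]
    simp [levSpec_nil_right, PySem.Str.len_eq]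
  · rw [if_neg h2, lev_core_eq]

lemma levenshtein_distance_eq (s1 s2 : String) :
    levenshtein_distance s1 s2 = (levSpec s1.toList.reverse s2.toList.reverse : Int) := by
  by_cases h : PySem.Str.len s1 < PySem.Str.len s2
  · rw [levenshtein_distance, if_pos h,
        levenshtein_distance_eq_of_ge s2 s1 (by simp only [PySem.Str.len_eq] at *; omega),
        levSpec_comm]
  · exact levenshtein_distance_eq_of_ge s1 s2 h

-- the two ports compute the same distance for each candidate
lemma distance_eq (q cl : String) :
    levenshtein_distance q cl = lev_alt cl.toList q.toList := by
  rw [levenshtein_distance_eq, lev_alt_eq, levSpec_comm]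

-- the distance is at least the length difference (justifies B's skip)
lemma distance_ge_len_diff (q cl : String) :
    |PySem.Str.len q - PySem.Str.len cl| ≤ lev_alt cl.toList q.toList := by
  rw [lev_alt_eq]
  have h := levSpec_len_le cl.toList.reverse q.toList.reverse
  simp only [List.length_reverse] at h
  simp only [PySem.Str.len_eq]
  rw [abs_le]
  omega

-- B's single loop equals A's exact-match scan followed by A's fuzzy fold
lemma loop_eq (q : String) (md : Int) : ∀ (cs : List String) (best : Option String) (bd : Int),
    fuzzyLoopB q md cs best bd =
      (match findExactA q cs with
      | some c => some c
      | none =>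
        (cs.foldl
          (fun st candidate =>
            let candidate_lower := PySem.Str.lower candidate
            let distance := levenshtein_distance q candidate_lower
            let adjusted_max :=
              min md (max 1 (PySem.Int.floordiv (PySem.Str.len candidate_lower) 3))
            if distance ≤ adjusted_max ∧ distance < st.2 then (some candidate, distance) else st)
          (best, bd)).1) := by
  intro cs
  induction cs with
  | nil => intro best bd; simp [fuzzyLoopB, findExactA]
  | cons c rest ih =>
    intro best bd
    rw [fuzzyLoopB, findExactA]
    by_cases hex : PySem.Str.lower c = q
    · rw [if_pos hex, if_pos hex]
    · rw [if_neg hex, if_neg hex]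
      dsimp only
      rw [List.foldl_cons]
      dsimp only
      set cl := PySem.Str.lower c with hcl
      set adj := min md (max 1 (PySem.Int.floordiv (PySem.Str.len cl) 3)) with hadj
      set d := lev_alt cl.toList q.toList with hd
      rw [distance_eq q cl, ← hd]
      by_cases hskip : |PySem.Str.len q - PySem.Str.len cl| > min adj (bd - 1)
      · rw [if_pos hskip]
        have hdge := distance_ge_len_diff q cl
        rw [← hd] at hdge
        have hcond : ¬ (d ≤ adj ∧ d < bd) := by
          intro ⟨h1, h2⟩
          have : d ≤ min adj (bd - 1) := by omega
          omega
        rw [if_neg hcond]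
        exact ih best bd
      · rw [if_neg hskip]
        by_cases hcond : d ≤ adj ∧ d < bd
        · rw [if_pos hcond, if_pos hcond]
          exact ih (some c) d
        · rw [if_neg hcond, if_neg hcond]
          exact ih best bd

-- ===== VERDICT (by name: the statement is the Claim_ definition above) =====
theorem fuzzy_find_best_match_spec : Claim_equal_fuzzy_find_best_match := by
  intro query candidates max_distance _
  unfold Spec_fuzzy_find_best_match fuzzy_find_best_match fuzzy_find_best_match_alt
  by_cases hg : PySem.Str.len query = 0 ∨ candidates.length = 0
  · rw [if_pos hg, if_pos hg]
  · rw [if_neg hg, if_neg hg]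
    dsimp only
    rw [loop_eq]
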